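-- pv_equiv track=rewrite | github.com/jfaponte403/milloxcoder | gui.py | _length_distribution
-- ===== SOURCE A (Python) =====
-- def _length_distribution(codes: dict, freqs: dict) -> list[tuple[int, int, int]]:
--     """Devuelve [(longitud, simbolos_unicos, ocurrencias_totales)]."""
--     by_len: dict[int, list[int]] = {}
--     for byte, code in codes.items():
--         by_len.setdefault(len(code), []).append(byte)
--     rows = []
--     for length in sorted(by_len):
--         bytes_at = by_len[length]
--         unique = len(bytes_at)
--         total_occ = sum(freqs.get(b, 0) for b in bytes_at)
--         rows.append((length, unique, total_occ))
--     return rows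
-- ===== SOURCE B (Python) =====
-- def _length_distribution(codes: dict, freqs: dict) -> list[tuple[int, int, int]]:
--     """Devuelve [(longitud, simbolos_unicos, ocurrencias_totales)]."""
--     count: dict[int, int] = {}
--     total: dict[int, int] = {}
--     for byte, code in codes.items():
--         n = len(code)
--         count[n] = count.get(n, 0) + 1
--         total[n] = total.get(n, 0) + freqs.get(byte, 0)
--     return [(n, count[n], total[n]) for n in sorted(count)]
-- ===== Notes on version B (the rewrite author's own statement) =====
-- stated objective: simpler
-- what changed: Instead of grouping bytes into per-length lists and then re-scanning each list to count and sum frequencies, B keeps two scalar accumulator dicts (unique count and occurrence total per length) updated in the single pass over codes, so no intermediate lists are built and no second per-length summation loop runs.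
import Mathlib
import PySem

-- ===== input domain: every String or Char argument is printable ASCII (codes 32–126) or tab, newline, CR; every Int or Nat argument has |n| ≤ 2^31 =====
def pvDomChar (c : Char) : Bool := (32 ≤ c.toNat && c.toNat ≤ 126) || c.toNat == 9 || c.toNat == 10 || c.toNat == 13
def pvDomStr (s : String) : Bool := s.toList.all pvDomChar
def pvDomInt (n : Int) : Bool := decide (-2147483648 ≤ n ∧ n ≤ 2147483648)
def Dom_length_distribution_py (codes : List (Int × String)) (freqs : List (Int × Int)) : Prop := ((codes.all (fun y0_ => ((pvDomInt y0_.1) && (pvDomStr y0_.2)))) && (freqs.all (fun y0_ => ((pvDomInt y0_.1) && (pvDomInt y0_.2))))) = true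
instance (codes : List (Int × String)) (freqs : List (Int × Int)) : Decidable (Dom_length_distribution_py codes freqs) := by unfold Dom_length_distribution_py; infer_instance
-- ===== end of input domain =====

-- B replaces A's dict-of-lists grouping plus second per-length summation pass with two
-- scalar accumulator dicts maintained in the single pass over codes (objective: simpler).

-- ===== PORT A =====
def length_distribution_py (codes : List (Int × String)) (freqs : List (Int × Int)) : List (Int × Int × Int) :=
  let byLen : PySem.Dict Int (List Int) :=
    codes.foldl (fun d p => d.modify ((PySem.Str.len p.2 : Int)) [] (fun v => v ++ [p.1])) PySem.Dict.empty
  let fd : PySem.Dict Int Int := PySem.Dict.mk freqs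
  (PySem.List.sorted byLen.keys (fun x => x) false).foldl
    (fun rows n =>
      let bytesAt := byLen.getD n []
      rows ++ [(n, (bytesAt.length : Int), (bytesAt.map (fun b => fd.getD b 0)).sum)]) []

-- ===== PORT B =====
def length_distribution_py_alt (codes : List (Int × String)) (freqs : List (Int × Int)) : List (Int × Int × Int) :=
  let fd : PySem.Dict Int Int := PySem.Dict.mk freqs
  let st : PySem.Dict Int Int × PySem.Dict Int Int :=
    codes.foldl (fun s p =>
        (s.1.modify ((PySem.Str.len p.2 : Int)) 0 (fun v => v + 1),
         s.2.modify ((PySem.Str.len p.2 : Int)) 0 (fun v => v + fd.getD p.1 0)))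
      (PySem.Dict.empty, PySem.Dict.empty)
  (PySem.List.sorted st.1.keys (fun x => x) false).map
    (fun n => (n, st.1.getD n 0, st.2.getD n 0))

-- ===== PRECONDITION & SPEC =====
def Spec_length_distribution_py (codes : List (Int × String)) (freqs : List (Int × Int)) (out : List (Int × Int × Int)) : Prop := out = length_distribution_py_alt codes freqs
instance (codes : List (Int × String)) (freqs : List (Int × Int)) (out : List (Int × Int × Int)) : Decidable (Spec_length_distribution_py codes freqs out) := by unfold Spec_length_distribution_py; infer_instance

-- ===== CLAIM (what is proved, stated in full; the proofs are below) =====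
def Claim_equal_length_distribution_py : Prop := ∀ (codes : List (Int × String)) (freqs : List (Int × Int)), Dom_length_distribution_py codes freqs → Spec_length_distribution_py codes freqs (length_distribution_py codes freqs)

-- ===== LEMMAS AND PROOFS =====

-- weighted counting loop: d[k(p)] = d.get(k(p),0) + g(p)  (the library only has the +1 form)
theorem getD_foldl_modify_add {α : Type} (l : List α) (k : α → Int) (g : α → Int)
    (d : PySem.Dict Int Int) (c : Int) :
    (l.foldl (fun d p => d.modify (k p) 0 (fun v => v + g p)) d).getD c 0
      = d.getD c 0 + ((l.filter (fun p => k p == c)).map g).sum := by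
  induction l generalizing d with
  | nil => simp
  | cons p t ih =>
    simp only [List.foldl_cons, ih, List.filter_cons]
    by_cases h : k p = c
    · subst h
      simp [PySem.Dict.getD_modify_self]
      ring
    · have hne : c ≠ k p := Ne.symm h
      have hb : (k p == c) = false := by simp [h]
      simp [hb, PySem.Dict.getD_modify, hne]

-- grouping loop through a key function: d.setdefault(k(p), []).append(g(p))
theorem getD_foldl_modify_append_key {α : Type} (l : List α) (k : α → Int) (g : α → Int)
    (d : PySem.Dict Int (List Int)) (c : Int) :
    (l.foldl (fun d p => d.modify (k p) [] (fun v => v ++ [g p])) d).getD c []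
      = d.getD c [] ++ (l.filter (fun p => k p == c)).map g := by
  induction l generalizing d with
  | nil => simp
  | cons p t ih =>
    simp only [List.foldl_cons, ih, List.filter_cons]
    by_cases h : k p = c
    · subst h
      simp [PySem.Dict.getD_modify_self]
    · have hne : c ≠ k p := Ne.symm h
      have hb : (k p == c) = false := by simp [h]
      simp [hb, PySem.Dict.getD_modify, hne]

-- both passes create the length keys in the same (first-appearance) order
theorem ld_keys_eq (codes : List (Int × String)) :
    (codes.foldl (fun d p => d.modify ((PySem.Str.len p.2 : Int)) [] (fun v => v ++ [p.1]))
        (PySem.Dict.empty : PySem.Dict Int (List Int))).keys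
      = (codes.foldl (fun d p => d.modify ((PySem.Str.len p.2 : Int)) 0 (fun v => v + 1))
          (PySem.Dict.empty : PySem.Dict Int Int)).keys := by
  rw [PySem.Dict.keys_foldl_modify_key, PySem.Dict.keys_foldl_modify_key]
  rfl

theorem length_distribution_py_spec : Claim_equal_length_distribution_py := by
  intro codes freqs _
  show length_distribution_py codes freqs = length_distribution_py_alt codes freqs
  simp only [length_distribution_py, length_distribution_py_alt]
  rw [PySem.List.foldl_prod_mk
      (f := fun (d : PySem.Dict Int Int) (p : Int × String) =>
        d.modify ((PySem.Str.len p.2 : Int)) 0 (fun v => v + 1))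
      (g := fun (d : PySem.Dict Int Int) (p : Int × String) =>
        d.modify ((PySem.Str.len p.2 : Int)) 0 (fun v => v + (PySem.Dict.mk freqs).getD p.1 0))]
  simp only [PySem.List.foldl_append_singleton_eq_map, List.nil_append]
  rw [ld_keys_eq codes]
  refine List.map_congr_left ?_
  intro n _
  rw [getD_foldl_modify_append_key codes (fun p => (PySem.Str.len p.2 : Int)) (fun p => p.1)
        PySem.Dict.empty n,
      getD_foldl_modify_add codes (fun p => (PySem.Str.len p.2 : Int)) (fun _ => (1 : Int))
        PySem.Dict.empty n,
      getD_foldl_modify_add codes (fun p => (PySem.Str.len p.2 : Int))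
        (fun p => (PySem.Dict.mk freqs).getD p.1 0) PySem.Dict.empty n]
  simp [List.map_map, Function.comp_def, List.map_const', List.sum_replicate]
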